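-- pv_equiv track=rewrite | github.com/tkirill/adventofcode | archive/year_2024/22_Monkey_Market.py | find_best_seq
-- ===== SOURCE A (Python) =====
-- import itertools as itls
--
-- def find_best_seq(seqs: list[dict[tuple[int, int, int, int], int]]):
--     cache = {}
--     best = 0
--     for s in itls.chain.from_iterable(x.keys() for x in seqs):
--         if s not in cache:
--             tmp = sum(x.get(s, 0) for x in seqs)
--             cache[s] = tmp
--             if tmp > best:
--                 best = tmp
--     return best
-- ===== SOURCE B (Python) =====
-- def find_best_seq(seqs):
--     totals = {}
--     for d in seqs:
--         for s, v in d.items():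
--             totals[s] = totals.get(s, 0) + v
--     best = 0
--     for t in totals.values():
--         if t > best:
--             best = t
--     return best
-- ===== Notes on version B (the rewrite author's own statement) =====
-- stated objective: faster
-- what changed: Instead of re-scanning all dicts for every distinct key (sum of get(s,0) per new key), B makes one pass over all (key,value) items accumulating per-key totals in a single dict, then takes the running max of the totals.
import Mathlib
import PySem

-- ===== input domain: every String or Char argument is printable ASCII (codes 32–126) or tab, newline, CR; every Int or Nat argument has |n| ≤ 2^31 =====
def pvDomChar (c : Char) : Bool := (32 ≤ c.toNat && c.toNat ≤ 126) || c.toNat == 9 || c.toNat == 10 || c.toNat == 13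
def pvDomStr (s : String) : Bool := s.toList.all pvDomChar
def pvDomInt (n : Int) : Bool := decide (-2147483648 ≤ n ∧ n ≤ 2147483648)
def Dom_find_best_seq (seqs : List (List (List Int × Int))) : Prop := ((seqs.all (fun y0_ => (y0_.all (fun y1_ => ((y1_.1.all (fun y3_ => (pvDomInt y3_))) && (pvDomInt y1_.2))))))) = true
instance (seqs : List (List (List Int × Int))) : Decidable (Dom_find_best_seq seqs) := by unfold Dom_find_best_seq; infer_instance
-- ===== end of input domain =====

-- B replaces A's per-distinct-key rescan of all dicts by one accumulation pass over all items (faster).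

-- ===== PORT A =====
def find_best_seq (seqs : List (List (List Int × Int))) : Int :=
  (seqs.flatMap (fun x => (PySem.Dict.mk x).keys)).foldl
    (fun (st : PySem.Dict (List Int) Int × Int) s =>
      if st.1.contains s then st
      else
        let tmp := (seqs.map (fun x => (PySem.Dict.mk x).getD s 0)).sum
        (st.1.insert s tmp, if tmp > st.2 then tmp else st.2))
    (PySem.Dict.empty, 0) |>.2

-- ===== PORT B =====
def find_best_seq_alt (seqs : List (List (List Int × Int))) : Int :=
  let totals := seqs.foldl (fun d x => x.foldl (fun d p => d.modify p.1 0 (· + p.2)) d)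
    (PySem.Dict.empty : PySem.Dict (List Int) Int)
  totals.values.foldl (fun b t => if t > b then t else b) 0

-- ===== PRECONDITION & SPEC =====
-- Pre_ excludes association lists with duplicate keys inside one dict: such inputs do not
-- represent any Python dict (dict keys are unique), and the two ports read duplicates differently.
def Pre_find_best_seq (seqs : List (List (List Int × Int))) : Prop :=
  ∀ x ∈ seqs, (x.map Prod.fst).Nodup
instance (seqs : List (List (List Int × Int))) : Decidable (Pre_find_best_seq seqs) := by
  unfold Pre_find_best_seq; infer_instance
def pvWitness_find_best_seq : (List (List (List Int × Int))) :=
  [[([1, 2], 3)], [([1, 2], 5), ([0], -1)]]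

def Spec_find_best_seq (seqs : List (List (List Int × Int))) (out : Int) : Prop := out = find_best_seq_alt seqs
instance (seqs : List (List (List Int × Int))) (out : Int) : Decidable (Spec_find_best_seq seqs out) := by unfold Spec_find_best_seq; infer_instance

-- ===== CLAIM (what is proved, stated in full; the proofs are below) =====
def Claim_equal_find_best_seq : Prop := ∀ (seqs : List (List (List Int × Int))), Dom_find_best_seq seqs → Pre_find_best_seq seqs → Spec_find_best_seq seqs (find_best_seq seqs)

-- ===== LEMMAS AND PROOFS =====

-- A's loop computes a running max of S s := Σ_x (Dict.mk x).getD s 0 over the key stream;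
-- the cache-skip never changes the max because a cached key's S-value is already ≤ best.
theorem maxIf_eq_max (a b : Int) : (if b > a then b else a) = max a b := by
  split_ifs <;> omega

theorem A_loop_char (seqs : List (List (List Int × Int))) (ks : List (List Int))
    (c : PySem.Dict (List Int) Int) (b : Int)
    (hinv : ∀ s, c.contains s = true → (seqs.map (fun x => (PySem.Dict.mk x).getD s 0)).sum ≤ b) :
    (ks.foldl
      (fun (st : PySem.Dict (List Int) Int × Int) s =>
        if st.1.contains s then st
        else
          let tmp := (seqs.map (fun x => (PySem.Dict.mk x).getD s 0)).sum
          (st.1.insert s tmp, if tmp > st.2 then tmp else st.2))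
      (c, b)).2
    = ks.foldl (fun b s => max b ((seqs.map (fun x => (PySem.Dict.mk x).getD s 0)).sum)) b := by
  induction ks generalizing c b with
  | nil => rfl
  | cons s t ih =>
    simp only [List.foldl_cons]
    by_cases hc : c.contains s = true
    · rw [if_pos hc, ih c b hinv, max_eq_left (hinv s hc)]
    · rw [if_neg hc]
      have hb' : ∀ s', (c.insert s ((seqs.map (fun x => (PySem.Dict.mk x).getD s 0)).sum)).contains s' = true →
          (seqs.map (fun x => (PySem.Dict.mk x).getD s' 0)).sum ≤
            (if (seqs.map (fun x => (PySem.Dict.mk x).getD s 0)).sum > b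
             then (seqs.map (fun x => (PySem.Dict.mk x).getD s 0)).sum else b) := by
        intro s' hs'
        rw [maxIf_eq_max]
        rw [PySem.Dict.contains_insert] at hs'
        rcases Bool.or_eq_true_iff.mp hs' with h | h
        · have hss : s' = s := eq_of_beq h
          subst hss; exact le_max_right _ _
        · exact le_trans (hinv s' h) (le_max_left _ _)
      exact (ih _ _ hb').trans (by rw [maxIf_eq_max])

-- per-dict: under nodup keys, first-match lookup equals the sum of matching item values
theorem getD_mk_eq_filter_sum (x : List (List Int × Int)) (s : List Int)
    (hnd : (x.map Prod.fst).Nodup) :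
    (PySem.Dict.mk x).getD s 0 = ((x.filter (fun p => p.1 == s)).map Prod.snd).sum := by
  induction x with
  | nil => rfl
  | cons p t ih =>
    obtain ⟨k, v⟩ := p
    simp only [List.map_cons, List.nodup_cons] at hnd
    by_cases h : k = s
    · have hb : (k == s) = true := beq_iff_eq.mpr h
      have hfil : (t.filter (fun q => q.1 == s)) = [] := by
        rw [List.filter_eq_nil_iff]
        intro q hq hqs
        exact hnd.1 (h ▸ (beq_iff_eq.mp hqs) ▸ List.mem_map_of_mem hq)
      simp [PySem.Dict.getD_eq_get?_getD, PySem.Dict.get?_mk_cons, hb, hfil]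
    · have hb : (k == s) = false := beq_eq_false_iff_ne.mpr h
      have ih' := ih hnd.2
      simp only [PySem.Dict.getD_eq_get?_getD, PySem.Dict.get?_mk_cons, hb] at ih' ⊢
      simp [hb, ih']

-- running max of a projection depends only on the MEMBERS of the key list
theorem foldl_max_proj_congr (l₁ l₂ : List (List Int)) (f : List Int → Int) (b : Int)
    (h : ∀ s, s ∈ l₁ ↔ s ∈ l₂) :
    l₁.foldl (fun b s => max b (f s)) b = l₂.foldl (fun b s => max b (f s)) b := by
  have key : ∀ (u v : List (List Int)), (∀ s ∈ u, s ∈ v) →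
      (u.map f).foldl max b ≤ (v.map f).foldl max b := by
    intro u v huv
    rcases PySem.List.foldl_max_mem (u.map f) b with he | hm
    · rw [he]; exact (PySem.List.le_foldl_max (v.map f) b).1
    · rcases List.mem_map.mp hm with ⟨s, hs, hfs⟩
      rw [← hfs]
      exact (PySem.List.le_foldl_max (v.map f) b).2 _ (List.mem_map_of_mem (huv s hs))
  have e : ∀ (l : List (List Int)), l.foldl (fun b s => max b (f s)) b = (l.map f).foldl max b := by
    intro l; rw [List.foldl_map]
  rw [e l₁, e l₂]
  exact le_antisymm (key l₁ l₂ (fun s hs => (h s).mp hs)) (key l₂ l₁ (fun s hs => (h s).mpr hs))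

-- B's totals dict: value at s = sum of values of items keyed s
theorem totals_getD (l : List (List Int × Int)) (d : PySem.Dict (List Int) Int) (s : List Int) :
    (l.foldl (fun d p => d.modify p.1 0 (· + p.2)) d).getD s 0
      = d.getD s 0 + ((l.filter (fun p => p.1 == s)).map Prod.snd).sum := by
  induction l generalizing d with
  | nil => simp
  | cons p t ih =>
    simp only [List.foldl_cons]
    rw [ih]
    by_cases h : p.1 = s
    · have hb : (p.1 == s) = true := beq_iff_eq.mpr h
      rw [PySem.Dict.getD_modify]
      simp [h]; omega
    · have hb : (p.1 == s) = false := beq_eq_false_iff_ne.mpr h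
      rw [PySem.Dict.getD_modify]
      simp [hb, Ne.symm h]

-- ===== VERDICT (by name: the statement is the Claim_ definition above) =====
theorem find_best_seq_spec : Claim_equal_find_best_seq := by
  intro seqs _ hpre
  unfold Spec_find_best_seq find_best_seq find_best_seq_alt
  -- A side
  rw [A_loop_char seqs _ _ _ (by intro s hs; simp [PySem.Dict.contains_empty] at hs)]
  -- B side
  set items := seqs.flatten with hitems
  have hfold : seqs.foldl (fun d x => x.foldl (fun d p => d.modify p.1 0 (· + p.2)) d)
      (PySem.Dict.empty : PySem.Dict (List Int) Int)
      = items.foldl (fun d p => d.modify p.1 0 (· + p.2)) PySem.Dict.empty := by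
    rw [hitems, List.foldl_flatten]
  simp only [hfold]
  set totals := items.foldl (fun d p => d.modify p.1 0 (· + p.2)) PySem.Dict.empty with htot
  have hkeys : totals.keys = PySem.Set.ofList (items.map Prod.fst) := by
    rw [htot, PySem.Dict.keys_foldl_modify_key]
    rfl
  have hnodup : totals.keys.Nodup := by
    rw [hkeys]; exact PySem.Set.nodup_ofList _
  have hvals : totals.values = totals.keys.map (fun k => totals.getD k 0) :=
    PySem.Dict.values_eq_map_keys totals hnodup 0
  rw [hvals]
  -- rewrite B's if-loop into a running max, then into a max over the key list
  have hBmax : (totals.keys.map (fun k => totals.getD k 0)).foldl (fun b t => if t > b then t else b) 0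
      = totals.keys.foldl (fun b s => max b (totals.getD s 0)) 0 := by
    rw [PySem.List.foldl_congr_mem _ _ (fun b t => max b t) _ (fun acc x _ => maxIf_eq_max acc x),
      List.foldl_map]
  rw [hBmax]
  -- per-key values agree
  have hSval : ∀ s ∈ seqs.flatMap (fun x => (PySem.Dict.mk x).keys),
      (seqs.map (fun x => (PySem.Dict.mk x).getD s 0)).sum = totals.getD s 0 := by
    intro s _
    rw [htot, totals_getD]
    have hcg : ∀ x ∈ seqs, (PySem.Dict.mk x).getD s 0 = ((x.filter (fun p => p.1 == s)).map Prod.snd).sum := by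
      intro x hx; exact getD_mk_eq_filter_sum x s (hpre x hx)
    rw [List.map_congr_left hcg]
    simp [hitems, List.filter_flatten, List.map_flatten, List.sum_flatten,
      Function.comp_def, PySem.Dict.getD_empty]
  calc (seqs.flatMap (fun x => (PySem.Dict.mk x).keys)).foldl
        (fun b s => max b ((seqs.map (fun x => (PySem.Dict.mk x).getD s 0)).sum)) 0
      = (seqs.flatMap (fun x => (PySem.Dict.mk x).keys)).foldl
        (fun b s => max b (totals.getD s 0)) 0 :=
        PySem.List.foldl_congr_mem' _ _ _ _ (fun s hs acc => by rw [hSval s hs])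
    _ = totals.keys.foldl (fun b s => max b (totals.getD s 0)) 0 := by
        apply foldl_max_proj_congr
        intro s
        rw [hkeys, PySem.Set.mem_ofList]
        simp [List.mem_flatMap, PySem.Dict.keys, hitems, List.mem_flatten]
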